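-- pv_equiv track=rewrite | github.com/mkadz13/Dungeons-and-Zombies | main.py | generate_maze_layout
-- ===== SOURCE A (Python) =====
-- def generate_maze_layout(map_data, width, height):
--     """Level 3: Structured maze with clear paths"""
--     # Create a proper maze with clear corridors
--     # Horizontal walls with gaps
--     for i in range(2, width-2, 4):
--         for j in range(3, height-3):
--             if j % 4 != 0:  # Leave gaps every 4th row
--                 map_data[j][i] = 2
--
--     # Vertical walls with gaps
--     for j in range(2, height-2, 4):
--         for i in range(3, width-3):
--             if i % 4 != 0:  # Leave gaps every 4th column
--                 map_data[j][i] = 2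
--
--     # Strategic pillars
--     pillars = [(6, 6), (12, 10), (18, 8), (24, 12)]
--     for x, y in pillars:
--         if 0 < x < width-1 and 0 < y < height-1:
--             map_data[y][x] = 2
--     return map_data
-- ===== SOURCE B (Python) =====
-- PILLARS = ((6, 6), (12, 10), (18, 8), (24, 12))
--
-- def _is_wall(x, y, width, height):
--     if 2 <= x < width - 2 and (x - 2) % 4 == 0 and 3 <= y < height - 3 and y % 4 != 0:
--         return True
--     if 2 <= y < height - 2 and (y - 2) % 4 == 0 and 3 <= x < width - 3 and x % 4 != 0:
--         return True
--     return (x, y) in PILLARS and 0 < x < width - 1 and 0 < y < height - 1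
--
-- def generate_maze_layout(map_data, width, height):
--     """Level 3: Structured maze with clear paths (single per-cell pass)"""
--     for y, row in enumerate(map_data):
--         for x in range(len(row)):
--             if _is_wall(x, y, width, height):
--                 row[x] = 2
--     return map_data
-- ===== Notes on version B (the rewrite author's own statement) =====
-- stated objective: alternative
-- what changed: A makes three separate write passes (horizontal wall columns, vertical wall rows, then pillars) mutating cells to 2; B makes one pass over every existing cell and sets it to 2 when a single combined wall/pillar predicate holds, which is equivalent because A only ever writes the constant 2.
import Mathlib
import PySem

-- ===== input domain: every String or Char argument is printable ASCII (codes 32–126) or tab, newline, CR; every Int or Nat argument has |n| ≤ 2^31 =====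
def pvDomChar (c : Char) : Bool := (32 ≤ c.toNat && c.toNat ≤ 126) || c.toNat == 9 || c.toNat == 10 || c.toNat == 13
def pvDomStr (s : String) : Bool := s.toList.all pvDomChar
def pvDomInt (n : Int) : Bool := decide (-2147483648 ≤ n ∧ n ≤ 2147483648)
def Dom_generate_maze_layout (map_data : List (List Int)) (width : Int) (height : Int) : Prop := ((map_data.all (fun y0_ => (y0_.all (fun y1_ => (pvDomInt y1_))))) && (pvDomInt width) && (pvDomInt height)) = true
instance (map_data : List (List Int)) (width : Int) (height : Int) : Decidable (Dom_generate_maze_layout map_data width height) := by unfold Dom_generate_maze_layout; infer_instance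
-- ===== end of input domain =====

-- B replaces A's three separate write loops by one per-cell pass testing a combined wall
-- predicate (different decomposition, objective: alternative/simpler); A mutates map_data in
-- place in Python — the equivalence proved here is about the RETURN value (B mutates it too).

-- ===== PORT A =====
-- map_data[j][i] = 2 : all indices A writes are nonnegative, so .toNat is exact here;
-- a write outside the grid raises IndexError in Python (the generator never produces such inputs)
-- and leaves the grid unchanged in this port.
def pvSet2 (m : List (List Int)) (j i : Nat) : List (List Int) :=
  m.modify j (fun row => row.set i 2)

def generate_maze_layout (map_data : List (List Int)) (width : Int) (height : Int) : List (List Int) :=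
  -- Horizontal walls with gaps
  let m1 := (PySem.List.pyRange 2 (width - 2) 4).foldl (fun m i =>
      (PySem.List.pyRange 3 (height - 3) 1).foldl (fun m j =>
        if PySem.Int.mod j 4 ≠ 0 then pvSet2 m j.toNat i.toNat else m) m) map_data
  -- Vertical walls with gaps
  let m2 := (PySem.List.pyRange 2 (height - 2) 4).foldl (fun m j =>
      (PySem.List.pyRange 3 (width - 3) 1).foldl (fun m i =>
        if PySem.Int.mod i 4 ≠ 0 then pvSet2 m j.toNat i.toNat else m) m) m1
  -- Strategic pillars
  let m3 := ([((6 : Int), (6 : Int)), (12, 10), (18, 8), (24, 12)]).foldl (fun m p =>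
      if 0 < p.1 ∧ p.1 < width - 1 ∧ 0 < p.2 ∧ p.2 < height - 1 then
        pvSet2 m p.2.toNat p.1.toNat else m) m2
  m3

-- ===== PORT B =====
def pvPillars : List (Int × Int) := [(6, 6), (12, 10), (18, 8), (24, 12)]

def pvIsWall (x y width height : Int) : Bool :=
  (decide (2 ≤ x) && decide (x < width - 2) && (PySem.Int.mod (x - 2) 4 == 0)
     && decide (3 ≤ y) && decide (y < height - 3) && !(PySem.Int.mod y 4 == 0))
  || (decide (2 ≤ y) && decide (y < height - 2) && (PySem.Int.mod (y - 2) 4 == 0)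
     && decide (3 ≤ x) && decide (x < width - 3) && !(PySem.Int.mod x 4 == 0))
  || (decide ((x, y) ∈ pvPillars) && decide (0 < x) && decide (x < width - 1)
     && decide (0 < y) && decide (y < height - 1))

def generate_maze_layout_alt (map_data : List (List Int)) (width : Int) (height : Int) : List (List Int) :=
  map_data.mapIdx (fun y row =>
    row.mapIdx (fun x v => if pvIsWall (x : Int) (y : Int) width height then 2 else v))

-- ===== PRECONDITION & SPEC =====
-- Pre_ excludes exactly the inputs on which Python A raises IndexError: those where some
-- wall/pillar cell selected by width/height lies outside the given grid; stated in closed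
-- form via the largest wall row / largest wall column of each kind (cheap to decide).
def Pre_generate_maze_layout (map_data : List (List Int)) (width : Int) (height : Int) : Prop :=
  ((5 ≤ width ∧ 7 ≤ height) →
    (if (height - 4) % 4 ≠ 0 then height - 4 else height - 5) < (map_data.length : Int)) ∧
  ((7 ≤ width ∧ 5 ≤ height) →
    (height - 3) - ((height - 5) % 4) < (map_data.length : Int)) ∧
  (∀ p ∈ pvPillars, (0 < p.1 ∧ p.1 < width - 1 ∧ 0 < p.2 ∧ p.2 < height - 1) →
    p.2 < (map_data.length : Int)) ∧
  (∀ y ∈ List.range map_data.length,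
    ((5 ≤ width ∧ 3 ≤ (y : Int) ∧ (y : Int) < height - 3 ∧ (y : Int) % 4 ≠ 0) →
      (width - 3) - ((width - 5) % 4) < ((map_data.getD y []).length : Int)) ∧
    ((7 ≤ width ∧ 2 ≤ (y : Int) ∧ (y : Int) < height - 2 ∧ ((y : Int) - 2) % 4 = 0) →
      (if (width - 4) % 4 ≠ 0 then width - 4 else width - 5) < ((map_data.getD y []).length : Int)) ∧
    (∀ p ∈ pvPillars, (p.2 = (y : Int) ∧ 0 < p.1 ∧ p.1 < width - 1 ∧ 0 < p.2 ∧ p.2 < height - 1) →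
      p.1 < ((map_data.getD y []).length : Int)))
instance (map_data : List (List Int)) (width : Int) (height : Int) : Decidable (Pre_generate_maze_layout map_data width height) := by unfold Pre_generate_maze_layout; infer_instance

def pvWitness_generate_maze_layout : List (List Int) × Int × Int :=
  (List.replicate 8 (List.replicate 8 0), 8, 8)

def Spec_generate_maze_layout (map_data : List (List Int)) (width : Int) (height : Int) (out : List (List Int)) : Prop := out = generate_maze_layout_alt map_data width height
instance (map_data : List (List Int)) (width : Int) (height : Int) (out : List (List Int)) : Decidable (Spec_generate_maze_layout map_data width height out) := by unfold Spec_generate_maze_layout; infer_instance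

-- ===== CLAIM (what is proved, stated in full; the proofs are below) =====
def Claim_equal_generate_maze_layout : Prop := ∀ (map_data : List (List Int)) (width : Int) (height : Int), Dom_generate_maze_layout map_data width height → Pre_generate_maze_layout map_data width height → Spec_generate_maze_layout map_data width height (generate_maze_layout map_data width height)

-- ===== LEMMAS AND PROOFS =====

-- the cell of m at row y, column x (none when out of the grid)
def pvGetCell (m : List (List Int)) (y x : Nat) : Option Int :=
  m[y]?.bind (fun row => row[x]?)

-- the list of (row, column) coordinates A writes, in A's order
def pvWritesA (width height : Int) : List (Nat × Nat) :=
  (PySem.List.pyRange 2 (width - 2) 4).flatMap (fun i =>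
    ((PySem.List.pyRange 3 (height - 3) 1).filter (fun j => decide (PySem.Int.mod j 4 ≠ 0))).map
      (fun j => (j.toNat, i.toNat)))
  ++ (PySem.List.pyRange 2 (height - 2) 4).flatMap (fun j =>
    ((PySem.List.pyRange 3 (width - 3) 1).filter (fun i => decide (PySem.Int.mod i 4 ≠ 0))).map
      (fun i => (j.toNat, i.toNat)))
  ++ (pvPillars.filter (fun p =>
        decide (0 < p.1 ∧ p.1 < width - 1 ∧ 0 < p.2 ∧ p.2 < height - 1))).map
      (fun p => (p.2.toNat, p.1.toNat))

theorem pvGetCell_pvSet2 (m : List (List Int)) (j i y x : Nat) :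
    pvGetCell (pvSet2 m j i) y x =
      if j = y ∧ i = x then (pvGetCell m y x).map (fun _ => (2 : Int)) else pvGetCell m y x := by
  simp only [pvSet2, pvGetCell, List.getElem?_modify]
  by_cases hj : j = y
  · subst hj
    cases hrow : m[j]? with
    | none => simp
    | some row =>
      by_cases hi : i = x
      · subst hi
        simp [List.getElem?_set]
        by_cases hlt : i < row.length
        · simp [hlt]
        · simp [hlt]
      · simp [hi]
  · simp [hj]


theorem pvShape_pvSet2 (m : List (List Int)) (j i y : Nat) :
    ((pvSet2 m j i)[y]?).map List.length = (m[y]?).map List.length := by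
  simp only [pvSet2, List.getElem?_modify]
  cases m[y]? with
  | none => simp
  | some row => by_cases hj : j = y <;> simp [hj]


theorem pvGetCell_foldl (L : List (Nat × Nat)) (m : List (List Int)) (y x : Nat) :
    pvGetCell (L.foldl (fun m p => pvSet2 m p.1 p.2) m) y x =
      if (y, x) ∈ L then (pvGetCell m y x).map (fun _ => (2 : Int)) else pvGetCell m y x := by
  induction L generalizing m with
  | nil => simp
  | cons p L ih =>
    obtain ⟨a, b⟩ := p
    simp only [List.foldl_cons, ih, pvGetCell_pvSet2, List.mem_cons]
    by_cases hp : a = y ∧ b = x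
    · obtain ⟨rfl, rfl⟩ := hp
      by_cases hm : (a, b) ∈ L
      · simp only [hm, or_true, if_true, and_self, Option.map_map]
        cases pvGetCell m a b <;> rfl
      · simp [hm]
    · have hne : ¬((y, x) = (a, b)) := by
        simp only [Prod.mk.injEq]; tauto
      simp [hp, hne]


theorem pvShape_foldl (L : List (Nat × Nat)) (m : List (List Int)) (y : Nat) :
    ((L.foldl (fun m p => pvSet2 m p.1 p.2) m)[y]?).map List.length = (m[y]?).map List.length := by
  induction L generalizing m with
  | nil => rfl
  | cons p L ih => rw [List.foldl_cons, ih, pvShape_pvSet2]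


theorem pvA_eq_foldl (m : List (List Int)) (w h : Int) :
    generate_maze_layout m w h = (pvWritesA w h).foldl (fun m p => pvSet2 m p.1 p.2) m := by
  unfold generate_maze_layout pvWritesA pvPillars
  simp only [List.foldl_append, List.foldl_flatMap, List.foldl_map, List.foldl_filter,
    decide_eq_true_eq]


theorem pvMem_writes (w h : Int) (y x : Nat) :
    (y, x) ∈ pvWritesA w h ↔ pvIsWall (x : Int) (y : Int) w h = true := by
  simp only [pvWritesA, pvIsWall, pvPillars, List.mem_append, List.mem_flatMap, List.mem_map,
    List.mem_filter, PySem.List.mem_pyRange_iff_of_pos (by norm_num : (0:Int) < 4),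
    PySem.List.mem_pyRange_one, Bool.or_eq_true, Bool.and_eq_true, Bool.not_eq_true',
    decide_eq_true_eq, beq_iff_eq, beq_eq_false_iff_ne, ne_eq, Prod.mk.injEq,
    PySem.Int.mod_eq_zero_iff_dvd, List.mem_cons, List.not_mem_nil, or_false]
  constructor
  · rintro ((⟨i, ⟨hi1, hi2, hi3⟩, j, ⟨⟨hj1, hj2⟩, hj4⟩, hjy, hix⟩ |
             ⟨j, ⟨hj1, hj2, hj3⟩, i, ⟨⟨hi1, hi2⟩, hi4⟩, hjy, hix⟩) | ⟨⟨a, b⟩, ⟨hp, hg⟩, hpy, hpx⟩)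
    · left; left; omega
    · left; right; omega
    · simp only [Prod.mk.injEq] at hp
      simp only at hg hpy hpx
      right; omega
  · rintro ((h1 | h2) | ⟨⟨⟨⟨hp, hg1⟩, hg2⟩, hg3⟩, hg4⟩)
    · exact Or.inl (Or.inl ⟨(x : Int), ⟨by omega, by omega, by omega⟩,
        (y : Int), ⟨⟨by omega, by omega⟩, by omega⟩, by omega, by omega⟩)
    · exact Or.inl (Or.inr ⟨(y : Int), ⟨by omega, by omega, by omega⟩,
        (x : Int), ⟨⟨by omega, by omega⟩, by omega⟩, by omega, by omega⟩)
    · rcases hp with ⟨ha, hb⟩ | ⟨ha, hb⟩ | ⟨ha, hb⟩ | ⟨ha, hb⟩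
      · exact Or.inr ⟨(6, 6), ⟨Or.inl rfl, by omega, by omega, by omega, by omega⟩, by omega, by omega⟩
      · exact Or.inr ⟨(12, 10), ⟨Or.inr (Or.inl rfl), by omega, by omega, by omega, by omega⟩, by omega, by omega⟩
      · exact Or.inr ⟨(18, 8), ⟨Or.inr (Or.inr (Or.inl rfl)), by omega, by omega, by omega, by omega⟩, by omega, by omega⟩
      · exact Or.inr ⟨(24, 12), ⟨Or.inr (Or.inr (Or.inr rfl)), by omega, by omega, by omega, by omega⟩, by omega, by omega⟩


theorem pvGetCell_alt (m : List (List Int)) (w h : Int) (y x : Nat) :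
    pvGetCell (generate_maze_layout_alt m w h) y x =
      if pvIsWall (x : Int) (y : Int) w h then (pvGetCell m y x).map (fun _ => (2 : Int))
      else pvGetCell m y x := by
  simp only [generate_maze_layout_alt, pvGetCell, List.getElem?_mapIdx]
  cases m[y]? with
  | none => simp
  | some row =>
    simp only [Option.map_some, Option.bind_some, List.getElem?_mapIdx]
    cases row[x]? with
    | none => simp
    | some v =>
      by_cases hw : pvIsWall (x : Int) (y : Int) w h <;> simp [hw]


theorem pvShape_alt (m : List (List Int)) (w h : Int) (y : Nat) :
    ((generate_maze_layout_alt m w h)[y]?).map List.length = (m[y]?).map List.length := by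
  simp only [generate_maze_layout_alt, List.getElem?_mapIdx]
  cases m[y]? with
  | none => rfl
  | some row => simp


theorem pvExt (m₁ m₂ : List (List Int))
    (hs : ∀ y : Nat, (m₁[y]?).map List.length = (m₂[y]?).map List.length)
    (hc : ∀ y x, pvGetCell m₁ y x = pvGetCell m₂ y x) : m₁ = m₂ := by
  apply List.ext_getElem?
  intro y
  have hsy := hs y
  cases h1 : m₁[y]? with
  | none =>
    cases h2 : m₂[y]? with
    | none => rfl
    | some r => rw [h1, h2] at hsy; simp at hsy
  | some r1 =>
    cases h2 : m₂[y]? with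
    | none => rw [h1, h2] at hsy; simp at hsy
    | some r2 =>
      rw [h1, h2] at hsy; simp at hsy
      congr 1
      apply List.ext_getElem?
      intro x
      have hcx := hc y x
      simpa [pvGetCell, h1, h2] using hcx


-- ===== VERDICT (by name: the statement is the Claim_ definition above) =====
theorem generate_maze_layout_spec : Claim_equal_generate_maze_layout := by
  intro m w h _ _
  unfold Spec_generate_maze_layout
  rw [pvA_eq_foldl]
  apply pvExt
  · intro y; rw [pvShape_foldl, pvShape_alt]
  · intro y x
    rw [pvGetCell_foldl, pvGetCell_alt]
    by_cases hw : pvIsWall (x : Int) (y : Int) w h = true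
    · rw [if_pos ((pvMem_writes w h y x).mpr hw), if_pos hw]
    · rw [if_neg (fun hm => hw ((pvMem_writes w h y x).mp hm)), if_neg hw]
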